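-- pv_equiv track=rewrite | github.com/chen88358323/Mahjong | test/util/cc/readMsgByTorrent_win7.py | getUndownFileList
-- ===== SOURCE A (Python) =====
-- def getUndownFileList(tfiles,downedfiles):
--     tmap={}#key 去除了路径中的所有空格， val原路径
--     for tf in tfiles:
--         ctf=tf.replace(" ","")
--         tmap.setdefault(ctf,tf)
--     tflist=tmap.keys()
--     dmap={}
--     for df in downedfiles:
--         cdf=df.replace(" ","")
--         dmap.setdefault(cdf,df)
--     dflist=dmap.keys()
--     for dfile in dflist:
--         if dfile in tflist:
--             tmap.pop(dfile)
--
--     return  tmap.values()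
-- ===== SOURCE B (Python) =====
-- def getUndownFileList(tfiles, downedfiles):
--     dset = {df.replace(" ", "") for df in downedfiles}
--     res = {}
--     for tf in tfiles:
--         ctf = tf.replace(" ", "")
--         if ctf not in dset:
--             res.setdefault(ctf, tf)
--     return res.values()
-- ===== Notes on version B (the rewrite author's own statement) =====
-- stated objective: simpler
-- what changed: Replaces A's build-two-dicts-then-pop-matching-keys shape with one pass: a set of space-stripped downloaded names built first, then a single filtering scan over tfiles that only inserts names not in the set.
import Mathlib
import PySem

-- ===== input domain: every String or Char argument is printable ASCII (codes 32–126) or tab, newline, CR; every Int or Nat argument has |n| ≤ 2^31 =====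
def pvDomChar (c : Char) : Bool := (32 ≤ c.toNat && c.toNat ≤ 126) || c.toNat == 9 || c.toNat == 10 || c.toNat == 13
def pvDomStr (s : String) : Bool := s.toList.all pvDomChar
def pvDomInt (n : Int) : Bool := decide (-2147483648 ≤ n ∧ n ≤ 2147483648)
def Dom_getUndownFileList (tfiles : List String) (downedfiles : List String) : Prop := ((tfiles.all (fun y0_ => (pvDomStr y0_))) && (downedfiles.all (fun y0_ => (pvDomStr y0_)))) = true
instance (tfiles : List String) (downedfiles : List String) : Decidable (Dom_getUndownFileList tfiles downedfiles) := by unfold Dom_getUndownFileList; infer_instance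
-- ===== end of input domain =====

-- B replaces A's build-two-dicts-then-pop-downloaded-keys shape with one filtering pass over
-- tfiles against a precomputed set of space-stripped downloaded names (objective: simpler).


-- ===== PORT A =====
def getUndownFileList (tfiles : List String) (downedfiles : List String) : List String :=
  let tmap : PySem.Dict String String :=
    tfiles.foldl (fun d tf => d.setdefault (PySem.Str.replace tf " " "") tf) PySem.Dict.empty
  let dmap : PySem.Dict String String :=
    downedfiles.foldl (fun d df => d.setdefault (PySem.Str.replace df " " "") df) PySem.Dict.empty
  let dflist := dmap.keys
  let tmap2 :=
    dflist.foldl (fun t dfile =>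
      if t.contains dfile then          -- 'if dfile in tflist' on the LIVE keys view of tmap
        match t.pop? dfile with         -- tmap.pop(dfile); always some, the guard just held
        | some (_, t') => t'
        | none => t
      else t) tmap
  tmap2.values

-- ===== PORT B =====
def getUndownFileList_alt (tfiles : List String) (downedfiles : List String) : List String :=
  let dset : PySem.Set String :=
    PySem.Set.ofList (downedfiles.map (fun df => PySem.Str.replace df " " ""))
  let res : PySem.Dict String String :=
    tfiles.foldl (fun d tf =>
      let ctf := PySem.Str.replace tf " " ""
      if PySem.Set.contains dset ctf then d else d.setdefault ctf tf) PySem.Dict.empty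
  res.values

-- ===== PRECONDITION & SPEC =====
def Spec_getUndownFileList (tfiles : List String) (downedfiles : List String) (out : List String) : Prop := out = getUndownFileList_alt tfiles downedfiles
instance (tfiles : List String) (downedfiles : List String) (out : List String) : Decidable (Spec_getUndownFileList tfiles downedfiles out) := by unfold Spec_getUndownFileList; infer_instance

-- ===== CLAIM (what is proved, stated in full; the proofs are below) =====
def Claim_equal_getUndownFileList : Prop := ∀ (tfiles : List String) (downedfiles : List String), Dom_getUndownFileList tfiles downedfiles → Spec_getUndownFileList tfiles downedfiles (getUndownFileList tfiles downedfiles)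

-- ===== LEMMAS AND PROOFS =====

-- Dict membership coincides with Set/list membership of its keys list
theorem dict_contains_eq_keys_contains (d : PySem.Dict String String) (k : String) :
    d.contains k = PySem.Set.contains d.keys k := by
  simp only [PySem.Dict.contains, PySem.Set.contains, PySem.Dict.keys,
    List.contains_eq_any_beq, List.any_map]
  induction d.items with
  | nil => rfl
  | cons p ps ih =>
    simp only [BEq.comm] at ih ⊢
    simp [List.any_cons, ih]

-- keys of a single setdefault = Set.add on the keys list
theorem keys_setdefault (d : PySem.Dict String String) (k v : String) :
    (d.setdefault k v).keys = PySem.Set.add d.keys k := by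
  simp only [PySem.Dict.setdefault, PySem.Set.add, dict_contains_eq_keys_contains]
  split_ifs with h
  · rfl
  · simp [PySem.Dict.keys]

-- keys of a setdefault-build are exactly Set.update of the mapped names (list equality)
theorem keys_foldl_setdefault (l : List String) (key : String → String) (d : PySem.Dict String String) :
    (l.foldl (fun d x => d.setdefault (key x) x) d).keys = PySem.Set.update d.keys (l.map key) := by
  induction l generalizing d with
  | nil => rfl
  | cons x xs ih =>
    simp only [List.foldl_cons, List.map_cons, ih, keys_setdefault, PySem.Set.update]

-- A's pop loop erases exactly the keys listed in K, as an items filter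
theorem foldl_pop_eq_filter (K : List String) (t : PySem.Dict String String) :
    K.foldl (fun t dfile =>
      if t.contains dfile then
        match t.pop? dfile with
        | some (_, t') => t'
        | none => t
      else t) t
    = PySem.Dict.mk (t.items.filter (fun pr => !(K.contains pr.1))) := by
  induction K generalizing t with
  | nil =>
    cases t with
    | mk items => simp
  | cons k K ih =>
    have hstep : (if t.contains k then
        match t.pop? k with
        | some (_, t') => t'
        | none => t
      else t) = PySem.Dict.mk (t.items.filter (fun pr => !(pr.1 == k))) := by
      by_cases h : t.contains k = true
      · rw [if_pos h]
        have hsome : (t.get? k).isSome := by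
          rw [← PySem.Dict.contains_eq_isSome_get?]; exact h
        obtain ⟨v, hv⟩ := Option.isSome_iff_exists.mp hsome
        simp [PySem.Dict.pop?, hv, PySem.Dict.erase]
      · rw [if_neg h]
        have hall : ∀ pr ∈ t.items, (!(pr.1 == k)) = true := by
          intro pr hpr
          by_contra hc
          apply h
          simp only [PySem.Dict.contains, List.any_eq_true]
          exact ⟨pr, hpr, by simpa using hc⟩
        cases t with
        | mk items =>
          simp only [PySem.Dict.mk.injEq]
          exact (List.filter_eq_self.mpr hall).symm
    rw [List.foldl_cons, hstep, ih]
    congr 1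
    rw [List.filter_filter]
    apply List.filter_congr
    intro pr _
    simp only [List.contains_cons]
    cases hpk : pr.1 == k <;> simp

-- filtered-dict membership for a key the filter keeps
theorem contains_filter_of_keep (q : String → Bool) (d : PySem.Dict String String) (c : String)
    (hq : q c = false) :
    (PySem.Dict.mk (d.items.filter (fun pr => !(q pr.1)))).contains c = d.contains c := by
  simp only [PySem.Dict.contains]
  induction d.items with
  | nil => rfl
  | cons p ps ih =>
    by_cases hpc : (p.1 == c) = true
    · have : q p.1 = false := by rw [eq_of_beq hpc]; exact hq
      simp [this, hpc]
    · cases hqp : q p.1 <;>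
        simp [hqp, hpc, ih]

-- filtering the full setdefault build by "key not in the set" equals B's skip-build
theorem filter_build_eq_skip_build (q : String → Bool) (l : List String)
    (d : PySem.Dict String String) :
    PySem.Dict.mk ((l.foldl (fun d tf => d.setdefault (PySem.Str.replace tf " " "") tf) d).items.filter
        (fun pr => !(q pr.1)))
    = l.foldl (fun d tf =>
        if q (PySem.Str.replace tf " " "") then d
        else d.setdefault (PySem.Str.replace tf " " "") tf)
      (PySem.Dict.mk (d.items.filter (fun pr => !(q pr.1)))) := by
  induction l generalizing d with
  | nil => rfl
  | cons tf l ih =>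
    simp only [List.foldl_cons]
    rw [ih]
    congr 1
    by_cases hq : q (PySem.Str.replace tf " " "") = true
    · rw [if_pos hq]
      congr 1
      simp only [PySem.Dict.setdefault]
      split_ifs with h
      · rfl
      · simp [List.filter_append, hq]
    · rw [if_neg hq]
      simp only [Bool.not_eq_true] at hq
      simp only [PySem.Dict.setdefault, contains_filter_of_keep q d _ hq]
      split_ifs with h
      · rfl
      · simp [List.filter_append, hq]

-- ===== VERDICT (by name: the statement is the Claim_ definition above) =====
theorem getUndownFileList_spec : Claim_equal_getUndownFileList := by
  intro tfiles downedfiles _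
  unfold Spec_getUndownFileList getUndownFileList getUndownFileList_alt
  show (((downedfiles.foldl (fun d df => d.setdefault (PySem.Str.replace df " " "") df)
          (PySem.Dict.empty : PySem.Dict String String)).keys).foldl
        (fun t dfile =>
          if t.contains dfile then
            match t.pop? dfile with
            | some (_, t') => t'
            | none => t
          else t)
        (tfiles.foldl (fun d tf => d.setdefault (PySem.Str.replace tf " " "") tf) PySem.Dict.empty)).values
      = (tfiles.foldl (fun d tf =>
            if PySem.Set.contains (PySem.Set.ofList (downedfiles.map (fun df => PySem.Str.replace df " " ""))) (PySem.Str.replace tf " " "") then d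
            else d.setdefault (PySem.Str.replace tf " " "") tf) PySem.Dict.empty).values
  rw [keys_foldl_setdefault]
  have hkeys : PySem.Set.update ((PySem.Dict.empty : PySem.Dict String String).keys)
      (downedfiles.map (fun df => PySem.Str.replace df " " ""))
      = PySem.Set.ofList (downedfiles.map (fun df => PySem.Str.replace df " " "")) := rfl
  rw [hkeys, foldl_pop_eq_filter]
  have h := filter_build_eq_skip_build
    (fun k => PySem.Set.contains (PySem.Set.ofList (downedfiles.map (fun df => PySem.Str.replace df " " ""))) k)
    tfiles PySem.Dict.empty
  simp only [PySem.Set.contains] at h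
  rw [h]
  rfl
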